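-- pv_equiv track=rewrite | github.com/BOX-LEO/CORP | pruning/runner.py | _find_layer_key
-- ===== SOURCE A (Python) =====
-- from typing import Optional, Dict, List, Any
--
-- def _find_layer_key(layer_name: str, reports: Dict, target_type: str = 'mlp') -> Optional[str]:
--     """Find the report key for a layer name.
--
--     Args:
--         layer_name: Layer name to find
--         reports: Dictionary of reports
--         target_type: 'mlp' or 'attn'
--
--     Returns:
--         The matching key in reports, or None
--     """
--     # Handle .mlp or .attn suffix
--     if layer_name.endswith('.mlp'):
--         base_name = layer_name[:-4]
--         target_type = 'mlp'
--     elif layer_name.endswith('.attn'):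
--         base_name = layer_name[:-5]
--         target_type = 'attn'
--     else:
--         base_name = layer_name
--
--     if target_type == 'mlp':
--         # Try with .mlp.act suffix (activations after GELU, standard MLP)
--         for key in reports:
--             if f"{base_name}.mlp.act" in key:
--                 return key
--         # Try SwiGLU hook points
--         for key in reports:
--             if f"{base_name}.mlp.w3" in key:
--                 return key
--         for key in reports:
--             if f"{base_name}.mlp.down_proj" in key:
--                 return key
--         # Try with .mlp suffix
--         for key in reports:
--             if f"{base_name}.mlp" in key and ".act" not in key:
--                 return key
--     elif target_type == 'attn':
--         # Try with .attn.proj suffix (attention output)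
--         for key in reports:
--             if f"{base_name}.attn.proj" in key:
--                 return key
--         # Try with .attn suffix
--         for key in reports:
--             if f"{base_name}.attn" in key:
--                 return key
--
--     # Fallback: try exact match
--     for key in reports:
--         if base_name in key:
--             return key
--
--     return None
-- ===== SOURCE B (Python) =====
-- from typing import Optional, Dict
--
--
-- def _find_layer_key(layer_name: str, reports: Dict, target_type: str = 'mlp') -> Optional[str]:
--     """Single-pass re-implementation: rank every key by the priority of the
--     first predicate it matches and return the first key with minimal rank."""
--     if layer_name.endswith('.mlp'):
--         base_name = layer_name[:-4]
--         target_type = 'mlp'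
--     elif layer_name.endswith('.attn'):
--         base_name = layer_name[:-5]
--         target_type = 'attn'
--     else:
--         base_name = layer_name
--
--     if target_type == 'mlp':
--         preds = [
--             lambda k: base_name + '.mlp.act' in k,
--             lambda k: base_name + '.mlp.w3' in k,
--             lambda k: base_name + '.mlp.down_proj' in k,
--             lambda k: base_name + '.mlp' in k and '.act' not in k,
--         ]
--     elif target_type == 'attn':
--         preds = [
--             lambda k: base_name + '.attn.proj' in k,
--             lambda k: base_name + '.attn' in k,
--         ]
--     else:
--         preds = []
--     preds.append(lambda k: base_name in k)
--
--     best = None  # (priority, key)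
--     for key in reports:
--         for i, p in enumerate(preds):
--             if p(key):
--                 if best is None or i < best[0]:
--                     best = (i, key)
--                 break
--     return best[1] if best is not None else None
-- ===== Notes on version B (the rewrite author's own statement) =====
-- stated objective: alternative
-- what changed: A's up-to-five sequential first-match scans over the report keys are replaced by a single pass that ranks each key by the index of the first matching predicate in a priority list and keeps the first key of minimal rank.
import Mathlib
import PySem

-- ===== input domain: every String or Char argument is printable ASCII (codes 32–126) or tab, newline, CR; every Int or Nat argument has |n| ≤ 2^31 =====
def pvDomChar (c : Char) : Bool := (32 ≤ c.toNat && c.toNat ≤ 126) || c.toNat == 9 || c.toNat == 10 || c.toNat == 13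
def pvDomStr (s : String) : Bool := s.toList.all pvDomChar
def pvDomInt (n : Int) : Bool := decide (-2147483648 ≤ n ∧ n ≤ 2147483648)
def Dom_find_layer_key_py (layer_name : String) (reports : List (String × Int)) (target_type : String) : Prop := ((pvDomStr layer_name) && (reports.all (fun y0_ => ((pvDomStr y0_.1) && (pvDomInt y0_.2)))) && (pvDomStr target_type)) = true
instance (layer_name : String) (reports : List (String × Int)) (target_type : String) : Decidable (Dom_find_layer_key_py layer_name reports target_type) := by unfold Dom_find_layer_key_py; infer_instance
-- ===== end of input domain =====

-- B replaces A's five sequential scans of the reports by ONE pass that ranks each key by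
-- the first matching predicate and keeps the first key of minimal rank (objective: alternative).

-- ===== PORT A =====
-- literal transliteration of _find_layer_key: suffix handling, then up to five
-- sequential first-match scans over the report keys, in A's order.
def find_layer_key_py (layer_name : String) (reports : List (String × Int)) (target_type : String) : Option String :=
  let ln := layer_name.toList
  let bt : List Char × String :=
    if PySem.Chars.endswith ln ".mlp".toList then (PySem.Chars.slice ln none (some (-4)), "mlp")
    else if PySem.Chars.endswith ln ".attn".toList then (PySem.Chars.slice ln none (some (-5)), "attn")
    else (ln, target_type)
  let base := bt.1
  let tt := bt.2
  if tt = "mlp" then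
    match reports.find? (fun kv => PySem.Chars.isIn (base ++ ".mlp.act".toList) kv.1.toList) with
    | some kv => some kv.1
    | none =>
      match reports.find? (fun kv => PySem.Chars.isIn (base ++ ".mlp.w3".toList) kv.1.toList) with
      | some kv => some kv.1
      | none =>
        match reports.find? (fun kv => PySem.Chars.isIn (base ++ ".mlp.down_proj".toList) kv.1.toList) with
        | some kv => some kv.1
        | none =>
          match reports.find? (fun kv => PySem.Chars.isIn (base ++ ".mlp".toList) kv.1.toList && !PySem.Chars.isIn ".act".toList kv.1.toList) with
          | some kv => some kv.1
          | none =>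
            match reports.find? (fun kv => PySem.Chars.isIn base kv.1.toList) with
            | some kv => some kv.1
            | none => none
  else if tt = "attn" then
    match reports.find? (fun kv => PySem.Chars.isIn (base ++ ".attn.proj".toList) kv.1.toList) with
    | some kv => some kv.1
    | none =>
      match reports.find? (fun kv => PySem.Chars.isIn (base ++ ".attn".toList) kv.1.toList) with
      | some kv => some kv.1
      | none =>
        match reports.find? (fun kv => PySem.Chars.isIn base kv.1.toList) with
        | some kv => some kv.1
        | none => none
  else
    match reports.find? (fun kv => PySem.Chars.isIn base kv.1.toList) with
    | some kv => some kv.1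
    | none => none

-- ===== PORT B =====
-- one step of B's single pass: rank the key (f = index of the first matching predicate)
-- and keep the strictly better (first-of-minimal-rank) candidate.
def pvStep (f : String × Int → Option Nat) (b : Option (Nat × String)) (kv : String × Int) : Option (Nat × String) :=
  match f kv with
  | some i =>
    match b with
    | none => some (i, kv.1)
    | some (j, y) => if i < j then some (i, kv.1) else some (j, y)
  | none => b

def find_layer_key_py_alt (layer_name : String) (reports : List (String × Int)) (target_type : String) : Option String :=
  let ln := layer_name.toList
  let bt : List Char × String :=
    if PySem.Chars.endswith ln ".mlp".toList then (PySem.Chars.slice ln none (some (-4)), "mlp")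
    else if PySem.Chars.endswith ln ".attn".toList then (PySem.Chars.slice ln none (some (-5)), "attn")
    else (ln, target_type)
  let base := bt.1
  let tt := bt.2
  let preds : List (String × Int → Bool) :=
    (if tt = "mlp" then
      [fun kv => PySem.Chars.isIn (base ++ ".mlp.act".toList) kv.1.toList,
       fun kv => PySem.Chars.isIn (base ++ ".mlp.w3".toList) kv.1.toList,
       fun kv => PySem.Chars.isIn (base ++ ".mlp.down_proj".toList) kv.1.toList,
       fun kv => PySem.Chars.isIn (base ++ ".mlp".toList) kv.1.toList && !PySem.Chars.isIn ".act".toList kv.1.toList]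
     else if tt = "attn" then
      [fun kv => PySem.Chars.isIn (base ++ ".attn.proj".toList) kv.1.toList,
       fun kv => PySem.Chars.isIn (base ++ ".attn".toList) kv.1.toList]
     else []) ++ [fun kv => PySem.Chars.isIn base kv.1.toList]
  (reports.foldl (pvStep (fun kv => preds.findIdx? (fun p => p kv))) none).map (·.2)

-- ===== PRECONDITION & SPEC =====
def Spec_find_layer_key_py (layer_name : String) (reports : List (String × Int)) (target_type : String) (out : Option String) : Prop := out = find_layer_key_py_alt layer_name reports target_type
instance (layer_name : String) (reports : List (String × Int)) (target_type : String) (out : Option String) : Decidable (Spec_find_layer_key_py layer_name reports target_type out) := by unfold Spec_find_layer_key_py; infer_instance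

-- ===== CLAIM (what is proved, stated in full; the proofs are below) =====
def Claim_equal_find_layer_key_py : Prop := ∀ (layer_name : String) (reports : List (String × Int)) (target_type : String), Dom_find_layer_key_py layer_name reports target_type → Spec_find_layer_key_py layer_name reports target_type (find_layer_key_py layer_name reports target_type)

-- ===== LEMMAS AND PROOFS =====

-- A's shape as a recursion over the predicate list: first-match scan per predicate, in order.
def pvMultiFind : List (String × Int → Bool) → List (String × Int) → Option String
  | [], _ => none
  | p :: ps, xs =>
    match xs.find? p with
    | some kv => some kv.1
    | none => pvMultiFind ps xs

theorem pvFold_none (f : String × Int → Option Nat) (xs : List (String × Int))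
    (b : Option (Nat × String)) (h : ∀ x ∈ xs, f x = none) :
    xs.foldl (pvStep f) b = b := by
  induction xs generalizing b with
  | nil => rfl
  | cons a xs ih =>
    simp only [List.foldl_cons]
    rw [show pvStep f b a = b by simp [pvStep, h a (by simp)]]
    exact ih _ (fun x hx => h x (by simp [hx]))

theorem pvFold_keep_zero (f : String × Int → Option Nat) (xs : List (String × Int)) (y : String) :
    xs.foldl (pvStep f) (some (0, y)) = some (0, y) := by
  induction xs with
  | nil => rfl
  | cons a xs ih =>
    simp only [List.foldl_cons]
    rw [show pvStep f (some (0, y)) a = some (0, y) by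
      unfold pvStep; cases f a <;> simp]
    exact ih

theorem pvFold_find_zero (f : String × Int → Option Nat) (xs : List (String × Int))
    (b : Option (Nat × String)) (hb : ∀ j y, b = some (j, y) → 0 < j)
    (kv : String × Int) (h : xs.find? (fun x => f x == some 0) = some kv) :
    xs.foldl (pvStep f) b = some (0, kv.1) := by
  induction xs generalizing b with
  | nil => simp at h
  | cons a xs ih =>
    simp only [List.foldl_cons]
    by_cases ha : f a = some 0
    · have hkv : kv = a := by
        rw [List.find?_cons_of_pos (by simp [ha])] at h
        exact (Option.some_inj.mp h).symm
      subst hkv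
      have hstep : pvStep f b kv = some (0, kv.1) := by
        cases b with
        | none => simp [pvStep, ha]
        | some p =>
          obtain ⟨j, y⟩ := p
          simp [pvStep, ha, hb j y rfl]
      rw [hstep]
      exact pvFold_keep_zero f xs kv.1
    · rw [List.find?_cons_of_neg (by simp [ha])] at h
      refine ih _ ?_ h
      intro j y hj
      cases hfa : f a with
      | none =>
        simp only [pvStep, hfa] at hj; exact hb j y hj
      | some i =>
        have hi : 0 < i := Nat.pos_of_ne_zero (fun h0 => ha (by rw [hfa, h0]))
        cases b with
        | none =>
          simp only [pvStep, hfa] at hj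
          cases hj; omega
        | some p =>
          obtain ⟨j', y'⟩ := p
          have hb' := hb j' y' rfl
          simp only [pvStep, hfa] at hj
          split at hj <;> (cases hj; omega)

theorem pvFold_shift (g : String × Int → Option Nat) (xs : List (String × Int))
    (b : Option (Nat × String)) :
    xs.foldl (pvStep (fun x => (g x).map (· + 1))) (b.map (fun p => (p.1 + 1, p.2)))
      = (xs.foldl (pvStep g) b).map (fun p => (p.1 + 1, p.2)) := by
  induction xs generalizing b with
  | nil => rfl
  | cons a xs ih =>
    simp only [List.foldl_cons]
    have hstep : pvStep (fun x => (g x).map (· + 1)) (b.map (fun p => (p.1 + 1, p.2))) a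
        = (pvStep g b a).map (fun p => (p.1 + 1, p.2)) := by
      cases hga : g a with
      | none => simp [pvStep, hga]
      | some i =>
        cases b with
        | none => simp [pvStep, hga]
        | some p =>
          obtain ⟨j, y⟩ := p
          by_cases hij : i < j <;>
            simp [pvStep, hga, hij]
    rw [hstep]
    exact ih _

theorem pvFind?_congr {α : Type} (p q : α → Bool) (l : List α)
    (h : ∀ x ∈ l, p x = q x) : l.find? p = l.find? q := by
  induction l with
  | nil => rfl
  | cons a l ih =>
    simp only [List.find?_cons, h a (by simp)]
    split
    · rfl
    · exact ih (fun x hx => h x (by simp [hx]))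

theorem pvMultiFind_eq_fold (preds : List (String × Int → Bool)) (xs : List (String × Int)) :
    pvMultiFind preds xs
      = (xs.foldl (pvStep (fun kv => preds.findIdx? (fun p => p kv))) none).map (·.2) := by
  induction preds generalizing xs with
  | nil =>
    rw [pvFold_none _ _ _ (fun x _ => List.findIdx?_nil)]
    rfl
  | cons p ps ih =>
    match hf : xs.find? p with
    | some kv =>
      have h0 : xs.find? (fun x => (p :: ps).findIdx? (fun q => q x) == some 0) = some kv := by
        have : ∀ x : String × Int,
            ((p :: ps).findIdx? (fun q => q x) == some 0) = p x := by
          intro x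
          by_cases hp : p x
          · simp [List.findIdx?_cons, hp]
          · simp only [Bool.not_eq_true] at hp
            simp [List.findIdx?_cons, hp]
        rw [← hf]
        exact pvFind?_congr _ _ xs (fun x _ => this x)
      rw [pvFold_find_zero _ _ _ (by intro j y h; simp at h) kv h0]
      simp [pvMultiFind, hf]
    | none =>
      have hnp : ∀ x ∈ xs, p x = false := by
        intro x hx
        have := List.find?_eq_none.mp hf x hx
        simpa using this
      have hcong : xs.foldl (pvStep (fun kv => (p :: ps).findIdx? (fun q => q kv))) none
          = xs.foldl (pvStep (fun kv => ((ps.findIdx? (fun q => q kv)).map (· + 1)))) none := by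
        apply PySem.List.foldl_congr_mem
        intro b x hx
        have : (p :: ps).findIdx? (fun q => q x) = (ps.findIdx? (fun q => q x)).map (· + 1) := by
          simp [List.findIdx?_cons, hnp x hx]
        simp [pvStep, this]
      rw [hcong,
        show (none : Option (Nat × String))
            = (none : Option (Nat × String)).map (fun p => (p.1 + 1, p.2)) from rfl,
        pvFold_shift]
      simp only [Option.map_map]
      rw [show ((·.2) ∘ fun p : Nat × String => (p.1 + 1, p.2)) = (·.2) from rfl]
      rw [show pvMultiFind (p :: ps) xs = pvMultiFind ps xs by simp [pvMultiFind, hf]]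
      exact ih xs

-- ===== VERDICT (by name: the statement is the Claim_ definition above) =====
theorem find_layer_key_py_spec : Claim_equal_find_layer_key_py := by
  intro layer_name reports target_type _
  unfold Spec_find_layer_key_py find_layer_key_py find_layer_key_py_alt
  simp only []
  set bt : List Char × String :=
    if PySem.Chars.endswith layer_name.toList ".mlp".toList then
      (PySem.Chars.slice layer_name.toList none (some (-4)), "mlp")
    else if PySem.Chars.endswith layer_name.toList ".attn".toList then
      (PySem.Chars.slice layer_name.toList none (some (-5)), "attn")
    else (layer_name.toList, target_type) with hbt
  by_cases hm : bt.2 = "mlp"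
  · simp only [hm, reduceIte]
    exact pvMultiFind_eq_fold
      [fun kv => PySem.Chars.isIn (bt.1 ++ ".mlp.act".toList) kv.1.toList,
       fun kv => PySem.Chars.isIn (bt.1 ++ ".mlp.w3".toList) kv.1.toList,
       fun kv => PySem.Chars.isIn (bt.1 ++ ".mlp.down_proj".toList) kv.1.toList,
       fun kv => PySem.Chars.isIn (bt.1 ++ ".mlp".toList) kv.1.toList && !PySem.Chars.isIn ".act".toList kv.1.toList,
       fun kv => PySem.Chars.isIn bt.1 kv.1.toList] reports
  · by_cases ha : bt.2 = "attn"
    · simp only [ha, reduceIte]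
      exact pvMultiFind_eq_fold
        [fun kv => PySem.Chars.isIn (bt.1 ++ ".attn.proj".toList) kv.1.toList,
         fun kv => PySem.Chars.isIn (bt.1 ++ ".attn".toList) kv.1.toList,
         fun kv => PySem.Chars.isIn bt.1 kv.1.toList] reports
    · simp only [if_neg hm, if_neg ha]
      exact pvMultiFind_eq_fold
        [fun kv => PySem.Chars.isIn bt.1 kv.1.toList] reports
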